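-- pv_equiv track=rewrite | github.com/Nephidra/GOA-Homeworks | Day-0128/cw/main.py | min_min_max
-- ===== SOURCE A (Python) =====
-- def min_min_max(arr):
--     value1 = min(arr)
--     value2 = max(arr)
--     value3 = set(arr)
--
--     min_absent = None
--     for i in range(value1, value2 +1) :
--         if i not in value3 :
--             min_absent = i
--             break
--     if min_absent is None :
--         min_amsent = value2
--     return [value1, min_absent, value2]
-- ===== SOURCE B (Python) =====
-- def min_min_max(arr):
--     s = sorted(set(arr))
--     absent = None
--     for a, b in zip(s, s[1:]):
--         if b != a + 1:
--             absent = a + 1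
--             break
--     return [s[0], absent, s[-1]]
-- ===== Notes on version B (the rewrite author's own statement) =====
-- stated objective: alternative
-- what changed: B sorts the distinct values once and scans adjacent pairs for the first gap, instead of testing every integer of range(min, max+1) for membership in a set; cost depends on n log n rather than on the span max-min.
import Mathlib
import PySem

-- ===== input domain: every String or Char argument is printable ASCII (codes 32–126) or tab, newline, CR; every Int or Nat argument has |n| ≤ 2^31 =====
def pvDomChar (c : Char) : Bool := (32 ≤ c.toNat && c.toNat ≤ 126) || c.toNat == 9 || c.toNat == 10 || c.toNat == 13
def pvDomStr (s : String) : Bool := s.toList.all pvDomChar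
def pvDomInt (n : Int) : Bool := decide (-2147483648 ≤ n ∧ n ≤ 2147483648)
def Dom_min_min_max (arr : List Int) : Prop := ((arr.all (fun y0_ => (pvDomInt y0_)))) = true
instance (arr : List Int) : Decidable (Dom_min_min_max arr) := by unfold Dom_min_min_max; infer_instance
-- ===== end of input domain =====

-- B: sort the distinct values once and scan adjacent pairs for the first gap, instead of
-- testing every integer of range(min, max+1) for set membership (an alternative algorithm).

-- ===== PORT A =====
-- A's 'for i in range(value1, value2+1): if i not in value3: min_absent = i; break'
-- as a recursion over the loop counter (early exit at the break, as in the Python)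
def pvLoopA (value3 : PySem.Set Int) (i stop : Int) : Option Int :=
  if _h : i < stop then
    (if !(PySem.Set.contains value3 i) then some i else pvLoopA value3 (i + 1) stop)
  else none
termination_by (stop - i).toNat
decreasing_by omega

def min_min_max (arr : List Int) : List (Option Int) :=
  match PySem.List.min? arr (fun x => x), PySem.List.max? arr (fun x => x) with
  | some value1, some value2 =>
      let value3 : PySem.Set Int := PySem.Set.ofList arr
      -- for i in range(value1, value2+1): if i not in value3: min_absent = i; break
      let min_absent : Option Int := pvLoopA value3 value1 (value2 + 1)
      [some value1, min_absent, some value2]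
  | _, _ => []  -- min/max of an empty list raise ValueError (outside Pre_)

-- ===== PORT B =====
-- the 'for a, b in zip(s, s[1:])' loop with break
def pvGapScan : List Int → Option Int
  | a :: b :: rest => if b ≠ a + 1 then some (a + 1) else pvGapScan (b :: rest)
  | _ => none

def min_min_max_alt (arr : List Int) : List (Option Int) :=
  match h : PySem.List.sorted (PySem.Set.ofList arr) (fun x => x) false with
  | [] => []  -- s[0] raises IndexError (outside Pre_)
  | a :: t => [some a, pvGapScan (a :: t), some ((a :: t).getLast (by simp))]

-- ===== PRECONDITION & SPEC =====
-- Pre_ excludes the empty list, on which A raises ValueError (min of empty sequence).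
def Pre_min_min_max (arr : List Int) : Prop := arr ≠ []
instance (arr : List Int) : Decidable (Pre_min_min_max arr) := by unfold Pre_min_min_max; infer_instance
def pvWitness_min_min_max : List Int := ([3, 1, 7])

def Spec_min_min_max (arr : List Int) (out : List (Option Int)) : Prop := out = min_min_max_alt arr
instance (arr : List Int) (out : List (Option Int)) : Decidable (Spec_min_min_max arr out) := by unfold Spec_min_min_max; infer_instance

-- ===== CLAIM (what is proved, stated in full; the proofs are below) =====
def Claim_equal_min_min_max : Prop := ∀ (arr : List Int), Dom_min_min_max arr → Pre_min_min_max arr → Spec_min_min_max arr (min_min_max arr)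

-- ===== LEMMAS AND PROOFS =====

-- the early-exit loop is the find? over the range list
theorem pvLoopA_eq_find (value3 : PySem.Set Int) (i stop : Int) :
    pvLoopA value3 i stop =
      (PySem.List.pyRange i stop 1).find? (fun j => !(PySem.Set.contains value3 j)) := by
  by_cases h : i < stop
  · rw [pvLoopA, dif_pos h, PySem.List.pyRange_one_cons h, List.find?]
    by_cases hc : PySem.Set.contains value3 i
    · simp only [hc, Bool.not_true]
      exact pvLoopA_eq_find value3 (i + 1) stop
    · have hm : i ∉ value3 := fun m => hc ((PySem.Set.contains_iff _ _).2 m)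
      simp [hm]
  · rw [pvLoopA, dif_neg h, PySem.List.pyRange_one_eq_nil (by omega)]
    rfl
termination_by (stop - i).toNat
decreasing_by omega

-- in a Pairwise (· < ·) list, every element is ≤ the last one
theorem pvLe_getLast (s : List Int) (hs : s.Pairwise (· < ·)) (h : s ≠ []) :
    ∀ x ∈ s, x ≤ s.getLast h := by
  induction s with
  | nil => simp at h
  | cons a t ih =>
    intro x hx
    rcases List.pairwise_cons.1 hs with ⟨ha, ht⟩
    cases t with
    | nil => simp at hx; simp [hx]
    | cons b r =>
      have hlast : ((a :: b :: r).getLast h) = ((b :: r).getLast (by simp)) :=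
        List.getLast_cons (by simp)
      rw [hlast]
      rcases List.mem_cons.mp hx with heq | hx2
      · have h1 := ih ht (by simp) b (by simp)
        have hb := ha b (by simp)
        omega
      · exact ih ht (by simp) x hx2

-- the core step: scanning range(a, L+1) for the first value absent from s
-- equals the adjacent-gap scan of the strictly increasing list s = a :: t
theorem pvFind_eq_gapScan (p : Int → Bool) :
    ∀ (t : List Int) (a : Int), (a :: t).Pairwise (· < ·) →
    (∀ i, a ≤ i → (p i = !(decide (i ∈ a :: t)))) →
    (PySem.List.pyRange a ((a :: t).getLast (by simp) + 1) 1).find? p = pvGapScan (a :: t) := by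
  intro t
  induction t with
  | nil =>
    intro a _ hp
    rw [show (([a] : List Int).getLast (by simp)) = a from rfl,
        PySem.List.pyRange_one_singleton]
    simp [List.find?, hp a le_rfl]
    rfl
  | cons b r ih =>
    intro a hs hp
    rcases List.pairwise_cons.1 hs with ⟨ha, ht⟩
    have hab : a < b := ha b (by simp)
    have hL : b ≤ (b :: r).getLast (by simp) :=
      pvLe_getLast (b :: r) ht (by simp) b (by simp)
    have hlast : ((a :: b :: r).getLast (by simp)) = ((b :: r).getLast (by simp)) :=
      List.getLast_cons (by simp)
    rw [hlast]
    rw [PySem.List.pyRange_one_cons (by omega)]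
    have hpa : p a = false := by rw [hp a le_rfl]; simp
    rw [List.find?]
    simp only [hpa]
    by_cases hgap : b = a + 1
    · -- no gap: continue with the tail
      have hp' : ∀ i, b ≤ i → (p i = !(decide (i ∈ b :: r))) := by
        intro i hi
        rw [hp i (by omega)]
        have hiff : (i ∈ a :: b :: r) ↔ (i ∈ b :: r) := by
          constructor
          · intro hm
            rcases List.mem_cons.mp hm with heq | hm2
            · omega
            · exact hm2
          · intro hm; exact List.mem_cons_of_mem a hm
        simp [hiff]
      have := ih b ht hp'
      rw [hgap] at this ⊢
      rw [this]
      simp [pvGapScan]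
    · -- gap at a+1
      have hgap' : a + 1 < b := by omega
      rw [PySem.List.pyRange_one_cons (by omega)]
      have hnotmem : (a + 1) ∉ a :: b :: r := by
        intro hmem
        rcases List.mem_cons.mp hmem with heq | hmem
        · omega
        · rcases List.mem_cons.mp hmem with heq | hmem
          · omega
          · have := List.rel_of_pairwise_cons ht hmem
            omega
      have hpa1 : p (a + 1) = true := by
        rw [hp (a + 1) (by omega)]; simp [hnotmem]
      rw [List.find?]
      simp only [hpa1]
      simp [pvGapScan, hgap]

theorem min_min_max_spec : Claim_equal_min_min_max := by
  intro arr _ hne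
  unfold Spec_min_min_max min_min_max min_min_max_alt
  have hofne : PySem.Set.ofList arr ≠ [] := by
    cases arr with
    | nil => exact absurd rfl hne
    | cons x xs =>
      intro h
      have : x ∈ PySem.Set.ofList (x :: xs) := (PySem.Set.mem_ofList _ _).2 (by simp)
      simp [h] at this
  have hsne : PySem.List.sorted (PySem.Set.ofList arr) (fun x => x) false ≠ [] := by
    intro h
    exact hofne ((PySem.List.sorted_eq_nil_iff _ _ _).1 h)
  rcases hseq : PySem.List.sorted (PySem.Set.ofList arr) (fun x => x) false with _ | ⟨a, t⟩
  · exact absurd hseq hsne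
  -- facts about the sorted distinct list
  have hpw : (a :: t).Pairwise (· < ·) := by
    have := PySem.List.sorted_ofList_pairwise_lt (xs := arr)
    rwa [hseq] at this
  have hmemS : ∀ x : Int, x ∈ (a :: t) ↔ x ∈ arr := by
    intro x
    rw [← hseq, PySem.List.mem_sorted, PySem.Set.mem_ofList]
  -- min? arr = some a
  have hamem : a ∈ arr := (hmemS a).1 (by simp)
  have hmin : PySem.List.min? arr (fun x => x) = some a := by
    rcases hm : PySem.List.min? arr (fun x => x) with _ | m
    · rw [(PySem.List.min?_eq_none_iff _ _)] at hm; exact absurd hm hne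
    · have hmm : m ∈ arr := PySem.List.min?_mem hm
      have h1 : m ≤ a := PySem.List.min?_isMin hm a hamem
      have h2 : a ≤ m := by
        have := PySem.List.key_head_sorted_le (xs := PySem.Set.ofList arr)
          (key := fun x => x) hseq m ((PySem.Set.mem_ofList _ _).2 hmm)
        simpa using this
      have : m = a := le_antisymm h1 h2
      rw [this]
  -- max? arr = some last
  have hLmem : ((a :: t).getLast (by simp)) ∈ arr :=
    (hmemS _).1 (List.getLast_mem _)
  have hmax : PySem.List.max? arr (fun x => x) = some ((a :: t).getLast (by simp)) := by
    rcases hm : PySem.List.max? arr (fun x => x) with _ | m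
    · rw [(PySem.List.max?_eq_none_iff _ _)] at hm; exact absurd hm hne
    · have hmm : m ∈ arr := PySem.List.max?_mem hm
      have h1 : ((a :: t).getLast (by simp)) ≤ m := PySem.List.max?_isMax hm _ hLmem
      have h2 : m ≤ (a :: t).getLast (by simp) :=
        pvLe_getLast (a :: t) hpw (by simp) m ((hmemS m).2 hmm)
      have : m = (a :: t).getLast (by simp) := le_antisymm h2 h1
      rw [this]
  rw [hmin, hmax]
  simp only
  -- the absent scan
  have hfind :
      pvLoopA (PySem.Set.ofList arr) a ((a :: t).getLast (by simp) + 1) = pvGapScan (a :: t) := by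
    rw [pvLoopA_eq_find]
    apply pvFind_eq_gapScan _ t a hpw
    intro i _
    have hcon : (PySem.Set.contains (PySem.Set.ofList arr) i) = decide (i ∈ a :: t) := by
      by_cases hmem : i ∈ arr
      · rw [(PySem.Set.contains_iff _ _).2 ((PySem.Set.mem_ofList _ _).2 hmem)]
        simp [hmemS i, hmem]
      · have hfalse : ¬ ((PySem.Set.ofList arr).contains i = true) := fun hc =>
          hmem ((PySem.Set.mem_ofList _ _).1 ((PySem.Set.contains_iff _ _).1 hc))
        rw [Bool.not_eq_true] at hfalse
        rw [hfalse]
        simp [hmemS i, hmem]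
    rw [hcon]
  rw [hfind]
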